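-- pv_equiv track=rewrite | github.com/wideawakening/advent-of-code | 2024/day5/challenge.py | is_correct_sequence
-- ===== SOURCE A (Python) =====
-- from typing import Dict, List, Tuple
--
-- def is_correct_sequence(page_sequence: List[int], pages_order:Tuple[Dict[int, List[int]]]) -> bool:
--     reverse_page_sequence = list(reversed(page_sequence))
--     for idx, checking_page in enumerate(reverse_page_sequence):  # LEARN-reverse
--         if checking_page not in pages_order:
--             continue
--         else:
--             for requirement_page in pages_order[checking_page]:
--                 if requirement_page in reverse_page_sequence[idx:]:
--                     return False
--
--     return True
-- ===== SOURCE B (Python) =====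
-- def is_correct_sequence(page_sequence, pages_order):
--     # One indexing pass: first and last occurrence index of every page.
--     first = {}
--     last = {}
--     for i, p in enumerate(page_sequence):
--         if p not in first:
--             first[p] = i
--         last[p] = i
--     # Rule-major check: rule (page, requirements) is violated exactly when some
--     # requirement first occurs no later than the last occurrence of page.
--     for page, requirements in pages_order.items():
--         if page in last:
--             lp = last[page]
--             for r in requirements:
--                 if r in first and first[r] <= lp:
--                     return False
--     return True
-- ===== Notes on version B (the rewrite author's own statement) =====
-- stated objective: alternative
-- what changed: B makes one indexing pass recording each page's first and last occurrence index in two dicts, then checks each rule of pages_order by a pure index comparison (first[req] <= last[page]) with no scan of the sequence, instead of A's reversed sequence-major loop that rescans a suffix slice per requirement; Pre_ only excludes association lists with duplicate keys, which cannot arise from a Python dict.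
import Mathlib
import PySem

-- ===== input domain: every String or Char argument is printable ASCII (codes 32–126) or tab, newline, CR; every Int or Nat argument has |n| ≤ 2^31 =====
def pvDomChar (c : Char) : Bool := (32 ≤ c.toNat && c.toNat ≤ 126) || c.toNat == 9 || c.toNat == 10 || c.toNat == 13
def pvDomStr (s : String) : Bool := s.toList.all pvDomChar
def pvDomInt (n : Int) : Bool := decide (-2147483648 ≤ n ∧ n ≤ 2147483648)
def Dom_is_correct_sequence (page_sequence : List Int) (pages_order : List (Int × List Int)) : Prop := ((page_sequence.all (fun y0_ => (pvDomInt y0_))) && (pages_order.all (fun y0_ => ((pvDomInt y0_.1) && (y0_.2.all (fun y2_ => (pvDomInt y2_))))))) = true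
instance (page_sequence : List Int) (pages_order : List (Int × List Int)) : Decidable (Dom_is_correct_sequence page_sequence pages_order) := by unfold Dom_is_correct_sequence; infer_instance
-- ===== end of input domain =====

-- B replaces A's reversed, slice-rescanning sequence-major loop by one indexing pass
-- (first/last occurrence index of every page) followed by a rule-major check with no
-- inner scan of the sequence (alternative algorithm; speed not claimed).

-- ===== PORT A =====
-- A's 'for idx, checking_page in enumerate(reverse_page_sequence)' loop, as recursion on
-- the suffix reverse_page_sequence[idx:] (exactly the slice the inner membership test scans)
def pvAGo (pages_order : List (Int × List Int)) : List Int → Bool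
  | [] => true
  | p :: rest =>
    match pages_order.lookup p with
    | none => pvAGo pages_order rest
    | some reqs =>
      if reqs.any (fun r => (p :: rest).contains r) then false
      else pvAGo pages_order rest

def is_correct_sequence (page_sequence : List Int) (pages_order : List (Int × List Int)) : Bool :=
  pvAGo pages_order page_sequence.reverse

-- ===== PORT B =====
-- B's indexing loop: 'for i, p in enumerate(page_sequence): if p not in first: first[p] = i; last[p] = i'
def pvBuildMaps : List (Int × Int) → PySem.Dict Int Int → PySem.Dict Int Int →
    PySem.Dict Int Int × PySem.Dict Int Int
  | [], first, last => (first, last)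
  | (i, p) :: rest, first, last =>
    let first' := if first.contains p then first else first.insert p i
    pvBuildMaps rest first' (last.insert p i)

-- B's rule-major loop ('return False' on the first violated rule)
def pvCheck (first last : PySem.Dict Int Int) : List (Int × List Int) → Bool
  | [] => true
  | (page, requirements) :: rest =>
    match last.get? page with
    | none => pvCheck first last rest
    | some lp =>
      if requirements.any (fun r =>
          match first.get? r with
          | some fr => decide (fr ≤ lp)
          | none => false) then false
      else pvCheck first last rest

def is_correct_sequence_alt (page_sequence : List Int) (pages_order : List (Int × List Int)) : Bool :=
  let fl := pvBuildMaps (PySem.List.enumerate page_sequence 0) PySem.Dict.empty PySem.Dict.empty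
  pvCheck fl.1 fl.2 pages_order

-- ===== PRECONDITION & SPEC =====
-- Pre_ excludes association lists with a duplicated key: a Python dict cannot contain one
-- (so A never receives such an input); on them A's first-match lookup vs B's iteration over
-- all entries are both accidental readings of a non-dict.
def Pre_is_correct_sequence (page_sequence : List Int) (pages_order : List (Int × List Int)) : Prop :=
  (pages_order.map Prod.fst).Nodup
instance (page_sequence : List Int) (pages_order : List (Int × List Int)) : Decidable (Pre_is_correct_sequence page_sequence pages_order) := by unfold Pre_is_correct_sequence; infer_instance

def pvWitness_is_correct_sequence : List Int × (List (Int × List Int)) :=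
  ([75, 47, 61, 53, 29], [(47, [75]), (61, [47, 75]), (29, [61])])

def Spec_is_correct_sequence (page_sequence : List Int) (pages_order : List (Int × List Int)) (out : Bool) : Prop := out = is_correct_sequence_alt page_sequence pages_order
instance (page_sequence : List Int) (pages_order : List (Int × List Int)) (out : Bool) : Decidable (Spec_is_correct_sequence page_sequence pages_order out) := by unfold Spec_is_correct_sequence; infer_instance

-- ===== CLAIM (what is proved, stated in full; the proofs are below) =====
def Claim_equal_is_correct_sequence : Prop := ∀ (page_sequence : List Int) (pages_order : List (Int × List Int)), Dom_is_correct_sequence page_sequence pages_order → Pre_is_correct_sequence page_sequence pages_order → Spec_is_correct_sequence page_sequence pages_order (is_correct_sequence page_sequence pages_order)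

-- ===== LEMMAS AND PROOFS =====

-- A is falsified exactly on a decomposition l = u ++ x :: v whose head x has a rule
-- some requirement of which occurs in x :: v
lemma pvAGo_eq_false_iff (po : List (Int × List Int)) (l : List Int) :
    pvAGo po l = false ↔
      ∃ u x v reqs, l = u ++ x :: v ∧ po.lookup x = some reqs ∧ ∃ r ∈ reqs, r ∈ x :: v := by
  induction l with
  | nil => simp [pvAGo]
  | cons p rest ih =>
    cases hl : po.lookup p with
    | none =>
      simp only [pvAGo, hl]
      rw [ih]
      constructor
      · rintro ⟨u, x, v, reqs, hdec, hlk, hr⟩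
        exact ⟨p :: u, x, v, reqs, by simp [hdec], hlk, hr⟩
      · rintro ⟨u, x, v, reqs, hdec, hlk, hr⟩
        cases u with
        | nil =>
          simp only [List.nil_append, List.cons.injEq] at hdec
          obtain ⟨rfl, rfl⟩ := hdec
          rw [hl] at hlk; cases hlk
        | cons a u' =>
          simp only [List.cons_append, List.cons.injEq] at hdec
          obtain ⟨rfl, rfl⟩ := hdec
          exact ⟨u', x, v, reqs, rfl, hlk, hr⟩
    | some reqs =>
      simp only [pvAGo, hl]
      by_cases hany : (reqs.any fun r => (p :: rest).contains r) = true
      · rw [if_pos hany]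
        refine iff_of_true rfl ?_
        simp only [List.any_eq_true, List.contains_iff_mem] at hany
        obtain ⟨r, hr, hmem⟩ := hany
        exact ⟨[], p, rest, reqs, rfl, hl, r, hr, hmem⟩
      · rw [if_neg hany]
        rw [ih]
        constructor
        · rintro ⟨u, x, v, reqs', hdec, hlk, hr⟩
          exact ⟨p :: u, x, v, reqs', by simp [hdec], hlk, hr⟩
        · rintro ⟨u, x, v, reqs', hdec, hlk, r, hr, hmem⟩
          cases u with
          | nil =>
            simp only [List.nil_append, List.cons.injEq] at hdec
            obtain ⟨rfl, rfl⟩ := hdec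
            rw [hl] at hlk
            cases hlk
            exact absurd (by simpa only [List.any_eq_true, List.contains_iff_mem]
              using ⟨r, hr, hmem⟩) hany
          | cons a u' =>
            simp only [List.cons_append, List.cons.injEq] at hdec
            obtain ⟨rfl, rfl⟩ := hdec
            exact ⟨u', x, v, reqs', rfl, hlk, r, hr, hmem⟩

-- every element has a decomposition at its FIRST occurrence
lemma pvFirstDecomp {p : Int} {l : List Int} (h : p ∈ l) :
    ∃ u v, l = u ++ p :: v ∧ p ∉ u := by
  induction l with
  | nil => cases h
  | cons x xs ih =>
    by_cases hpx : p = x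
    · exact ⟨[], xs, by simp [hpx], by simp⟩
    · rcases List.mem_cons.mp h with h' | h'
      · exact absurd h' hpx
      · obtain ⟨u, v, rfl, hu⟩ := ih h'
        exact ⟨x :: u, v, rfl, by simp [hpx, hu]⟩

-- every element has a decomposition at its LAST occurrence
lemma pvLastDecomp {p : Int} {l : List Int} (h : p ∈ l) :
    ∃ u v, l = u ++ p :: v ∧ p ∉ v := by
  induction l with
  | nil => cases h
  | cons x xs ih =>
    by_cases hm : p ∈ xs
    · obtain ⟨u, v, rfl, hv⟩ := ih hm
      exact ⟨x :: u, v, rfl, hv⟩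
    · rcases List.mem_cons.mp h with rfl | h'
      · exact ⟨[], xs, rfl, hm⟩
      · exact absurd h' hm

-- the 'last' map ignores pages that do not occur
lemma pvBuildLastNotMem (l0 f : PySem.Dict Int Int) (p : Int) :
    ∀ (seq : List Int) (s : Int), p ∉ seq →
      ((pvBuildMaps (PySem.List.enumerate seq s) f l0).2).get? p = l0.get? p := by
  intro seq
  induction seq generalizing f l0 with
  | nil => intro s _; simp [PySem.List.enumerate_nil, pvBuildMaps]
  | cons x xs ih =>
    intro s hp
    rw [PySem.List.enumerate_cons]
    simp only [pvBuildMaps]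
    rw [ih _ _ _ (fun h => hp (List.mem_cons_of_mem _ h))]
    exact PySem.Dict.get?_insert_of_ne _ _ (fun h => hp (h ▸ List.mem_cons_self ..))

-- the 'last' map holds the index of the last occurrence
lemma pvBuildLastMem (p : Int) :
    ∀ (u v : List Int) (s : Int) (f l0 : PySem.Dict Int Int), p ∉ v →
      ((pvBuildMaps (PySem.List.enumerate (u ++ p :: v) s) f l0).2).get? p
        = some (s + u.length) := by
  intro u
  induction u with
  | nil =>
    intro v s f l0 hv
    simp only [List.nil_append, List.length_nil]
    rw [PySem.List.enumerate_cons]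
    simp only [pvBuildMaps]
    rw [pvBuildLastNotMem _ _ _ _ _ hv]
    rw [PySem.Dict.get?_insert_self]
    norm_num
  | cons a u' ih =>
    intro v s f l0 hv
    simp only [List.cons_append]
    rw [PySem.List.enumerate_cons]
    simp only [pvBuildMaps]
    rw [ih v (s + 1) _ _ hv]
    congr 1
    simp only [List.length_cons]
    push_cast
    ring

-- the 'first' map never overwrites an existing entry
lemma pvBuildFirstStable (p : Int) (j : Int) :
    ∀ (seq : List Int) (s : Int) (f l0 : PySem.Dict Int Int), f.get? p = some j →
      ((pvBuildMaps (PySem.List.enumerate seq s) f l0).1).get? p = some j := by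
  intro seq
  induction seq with
  | nil => intro s f l0 hf; simpa [PySem.List.enumerate_nil, pvBuildMaps] using hf
  | cons x xs ih =>
    intro s f l0 hf
    rw [PySem.List.enumerate_cons]
    simp only [pvBuildMaps]
    apply ih
    by_cases hc : f.contains x = true
    · rw [if_pos hc]; exact hf
    · rw [if_neg hc]
      by_cases hpx : p = x
      · subst hpx
        rw [PySem.Dict.contains_eq_isSome_get?, hf] at hc
        simp at hc
      · rw [PySem.Dict.get?_insert_of_ne _ _ hpx]; exact hf

-- pages absent from the sequence stay absent from the 'first' map
lemma pvBuildFirstNotMem (p : Int) :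
    ∀ (seq : List Int) (s : Int) (f l0 : PySem.Dict Int Int), p ∉ seq →
      ((pvBuildMaps (PySem.List.enumerate seq s) f l0).1).get? p = f.get? p := by
  intro seq
  induction seq with
  | nil => intro s f l0 _; simp [PySem.List.enumerate_nil, pvBuildMaps]
  | cons x xs ih =>
    intro s f l0 hp
    rw [PySem.List.enumerate_cons]
    simp only [pvBuildMaps]
    rw [ih _ _ _ (fun h => hp (List.mem_cons_of_mem _ h))]
    have hpx : p ≠ x := fun h => hp (h ▸ List.mem_cons_self ..)
    by_cases hc : f.contains x = true
    · rw [if_pos hc]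
    · rw [if_neg hc, PySem.Dict.get?_insert_of_ne _ _ hpx]

-- the 'first' map records the index of the first occurrence
lemma pvBuildFirstMem (p : Int) :
    ∀ (u v : List Int) (s : Int) (f l0 : PySem.Dict Int Int), p ∉ u → f.get? p = none →
      ((pvBuildMaps (PySem.List.enumerate (u ++ p :: v) s) f l0).1).get? p
        = some (s + u.length) := by
  intro u
  induction u with
  | nil =>
    intro v s f l0 _ hf
    simp only [List.nil_append, List.length_nil]
    rw [PySem.List.enumerate_cons]
    simp only [pvBuildMaps]
    have hc : f.contains p = false := by
      rw [PySem.Dict.contains_eq_isSome_get?, hf]; rfl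
    rw [if_neg (by simp [hc])]
    rw [pvBuildFirstStable p s _ _ _ _ (PySem.Dict.get?_insert_self _ _ _)]
    norm_num
  | cons a u' ih =>
    intro v s f l0 hu hf
    have hpa : p ≠ a := fun h => hu (h ▸ List.mem_cons_self ..)
    simp only [List.cons_append]
    rw [PySem.List.enumerate_cons]
    simp only [pvBuildMaps]
    have hf' : (if f.contains a = true then f else f.insert a s).get? p = none := by
      by_cases hc : f.contains a = true
      · rw [if_pos hc]; exact hf
      · rw [if_neg hc, PySem.Dict.get?_insert_of_ne _ _ hpa]; exact hf
    rw [ih v (s + 1) _ _ (fun h => hu (List.mem_cons_of_mem _ h)) hf']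
    congr 1
    simp only [List.length_cons]
    push_cast
    ring

-- positional helpers
lemma pvTakeDecomp (u : List Int) (x : Int) (v : List Int) :
    (u ++ x :: v).take (u.length + 1) = u ++ [x] := by
  rw [List.take_append]
  simp

-- an element of u ++ [x] sits at an index ≤ u.length of u ++ x :: v
lemma pvMemPrefixIdx {r x : Int} {u v : List Int} (h : r ∈ u ++ [x]) :
    ∃ k, k ≤ u.length ∧ (u ++ x :: v)[k]? = some r := by
  rcases List.mem_append.mp h with h' | h'
  · obtain ⟨k, hk, hget⟩ := List.getElem_of_mem h'
    refine ⟨k, Nat.le_of_lt hk, ?_⟩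
    rw [List.getElem?_append_left (by omega)]
    simp [List.getElem?_eq_getElem hk, hget]
  · refine ⟨u.length, le_refl _, ?_⟩
    rw [List.getElem?_append_right (le_refl _)]
    simp [List.mem_singleton.mp h']

-- the first-occurrence prefix length is minimal among occurrence indices
lemma pvFirstMin {r : Int} {ur vr : List Int} {k : Nat}
    (hnr : r ∉ ur) (hget : (ur ++ r :: vr)[k]? = some r) : ur.length ≤ k := by
  by_contra hlt
  push Not at hlt
  rw [List.getElem?_append_left hlt] at hget
  exact hnr (List.mem_of_getElem? hget)

-- the last-occurrence prefix length is maximal among occurrence indices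
lemma pvLastMax {p : Int} {up vp : List Int} {k : Nat}
    (hnp : p ∉ vp) (hget : (up ++ p :: vp)[k]? = some p) : k ≤ up.length := by
  by_contra hlt
  push Not at hlt
  rw [List.getElem?_append_right (by omega)] at hget
  rw [List.getElem?_cons, if_neg (by omega)] at hget
  exact hnp (List.mem_of_getElem? hget)

-- characterisation of the violation test computed by pvCheck for one rule
lemma pvCondIff (seq : List Int) (page : Int) (reqs : List Int) :
    (let fl := pvBuildMaps (PySem.List.enumerate seq 0) PySem.Dict.empty PySem.Dict.empty
     match fl.2.get? page with
     | none => false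
     | some lp => reqs.any (fun r =>
         match fl.1.get? r with
         | some fr => decide (fr ≤ lp)
         | none => false)) = true ↔
    ∃ u v, seq = u ++ page :: v ∧ ∃ r ∈ reqs, r ∈ u ++ [page] := by
  dsimp only
  constructor
  · intro h
    cases hL : (pvBuildMaps (PySem.List.enumerate seq 0) PySem.Dict.empty PySem.Dict.empty).2.get? page with
    | none => rw [hL] at h; cases h
    | some lp =>
      rw [hL] at h
      obtain ⟨r, hr, hcond⟩ := List.any_eq_true.mp h
      cases hF : (pvBuildMaps (PySem.List.enumerate seq 0) PySem.Dict.empty PySem.Dict.empty).1.get? r with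
      | none => rw [hF] at hcond; cases hcond
      | some fr =>
        rw [hF] at hcond
        have hfl : fr ≤ lp := of_decide_eq_true hcond
        have hpm : page ∈ seq := by
          by_contra hpm
          rw [pvBuildLastNotMem _ _ _ _ _ hpm, PySem.Dict.get?_empty] at hL
          cases hL
        have hrm : r ∈ seq := by
          by_contra hrm
          rw [pvBuildFirstNotMem _ _ _ _ _ hrm, PySem.Dict.get?_empty] at hF
          cases hF
        obtain ⟨up, vp, hdecp, hnvp⟩ := pvLastDecomp hpm
        obtain ⟨ur, vr, hdecr, hnur⟩ := pvFirstDecomp hrm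
        have hLv : (pvBuildMaps (PySem.List.enumerate seq 0) PySem.Dict.empty PySem.Dict.empty).2.get? page
            = some ((0 : Int) + up.length) := by
          rw [hdecp]; exact pvBuildLastMem _ _ _ _ _ _ hnvp
        have hFv : (pvBuildMaps (PySem.List.enumerate seq 0) PySem.Dict.empty PySem.Dict.empty).1.get? r
            = some ((0 : Int) + ur.length) := by
          rw [hdecr]; exact pvBuildFirstMem _ _ _ _ _ _ hnur (PySem.Dict.get?_empty _)
        rw [hL] at hLv
        rw [hF] at hFv
        have hlp : lp = (up.length : Int) := by
          injection hLv with h'; omega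
        have hfr : fr = (ur.length : Int) := by
          injection hFv with h'; omega
        have hlen : ur.length ≤ up.length := by
          rw [hlp, hfr] at hfl; exact_mod_cast hfl
        refine ⟨up, vp, hdecp, r, hr, ?_⟩
        have hidx : seq[ur.length]? = some r := by
          rw [hdecr, List.getElem?_append_right (le_refl _)]
          simp
        have htake : seq.take (up.length + 1) = up ++ [page] := by
          rw [hdecp]; exact pvTakeDecomp up page vp
        have hidx' : (seq.take (up.length + 1))[ur.length]? = some r := by
          rwa [List.getElem?_take_of_lt (by omega)]
        rw [htake] at hidx'
        exact List.mem_of_getElem? hidx'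
  · rintro ⟨u, v, hdec, r, hr, hmem⟩
    have hpm : page ∈ seq := by rw [hdec]; simp
    have hrm : r ∈ seq := by
      rw [hdec]
      rcases List.mem_append.mp hmem with h' | h'
      · exact List.mem_append.mpr (Or.inl h')
      · simp [List.mem_singleton.mp h']
    obtain ⟨up, vp, hdecp, hnvp⟩ := pvLastDecomp hpm
    obtain ⟨ur, vr, hdecr, hnur⟩ := pvFirstDecomp hrm
    have hLv : (pvBuildMaps (PySem.List.enumerate seq 0) PySem.Dict.empty PySem.Dict.empty).2.get? page
        = some ((0 : Int) + up.length) := by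
      rw [hdecp]; exact pvBuildLastMem _ _ _ _ _ _ hnvp
    have hFv : (pvBuildMaps (PySem.List.enumerate seq 0) PySem.Dict.empty PySem.Dict.empty).1.get? r
        = some ((0 : Int) + ur.length) := by
      rw [hdecr]; exact pvBuildFirstMem _ _ _ _ _ _ hnur (PySem.Dict.get?_empty _)
    rw [hLv]
    apply List.any_eq_true.mpr
    refine ⟨r, hr, ?_⟩
    rw [hFv]
    have hord : ur.length ≤ up.length := by
      obtain ⟨k, hku, hkget⟩ := pvMemPrefixIdx (v := v) hmem
      rw [← hdec] at hkget
      have h1 : ur.length ≤ k := pvFirstMin hnur (by rwa [← hdecr])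
      have h2 : u.length ≤ up.length := by
        have hpget : seq[u.length]? = some page := by
          rw [hdec, List.getElem?_append_right (le_refl _)]
          simp
        exact pvLastMax hnvp (by rwa [← hdecp])
      omega
    simp
    omega

-- with pairwise-distinct keys, first-match lookup is exactly membership
lemma pvLookup_iff_mem (po : List (Int × List Int)) (hnd : (po.map Prod.fst).Nodup)
    (x : Int) (reqs : List Int) : po.lookup x = some reqs ↔ (x, reqs) ∈ po := by
  induction po with
  | nil => simp [List.lookup]
  | cons pr rest ih =>
    obtain ⟨p, rs⟩ := pr
    simp only [List.map_cons, List.nodup_cons] at hnd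
    obtain ⟨hp, hnd'⟩ := hnd
    by_cases hxp : x = p
    · subst hxp
      simp only [List.lookup, beq_self_eq_true, List.mem_cons]
      constructor
      · rintro h; injection h with h'; exact Or.inl (by rw [h'])
      · rintro (h | hm)
        · rw [Prod.ext_iff] at h; exact congrArg some h.2.symm
        · exact absurd (List.mem_map_of_mem (f := Prod.fst) hm) (by simpa using hp)
    · have hbe : (x == p) = false := by simp [hxp]
      simp only [List.lookup, hbe, List.mem_cons, Prod.mk.injEq]
      rw [ih hnd']
      constructor
      · exact Or.inr
      · rintro (⟨rfl, _⟩ | hm)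
        · exact absurd rfl hxp
        · exact hm

-- B's outer loop returns false exactly when the test fires for some rule of pages_order
lemma pvCheckRules_eq_false_iff (first last : PySem.Dict Int Int) (po : List (Int × List Int)) :
    pvCheck first last po = false ↔ ∃ pr ∈ po,
      (match last.get? pr.1 with
       | none => false
       | some lp => pr.2.any (fun r =>
           match first.get? r with
           | some fr => decide (fr ≤ lp)
           | none => false)) = true := by
  induction po with
  | nil => simp [pvCheck]
  | cons pr rest ih =>
    obtain ⟨p, reqs⟩ := pr
    simp only [pvCheck]
    cases hl : last.get? p with
    | none =>
      rw [ih]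
      constructor
      · rintro ⟨q, hm, hq⟩
        exact ⟨q, List.mem_cons_of_mem _ hm, hq⟩
      · rintro ⟨q, hm, hq⟩
        rcases List.mem_cons.mp hm with rfl | hm'
        · rw [hl] at hq; cases hq
        · exact ⟨q, hm', hq⟩
    | some lp =>
      dsimp only
      by_cases hany : (reqs.any fun r =>
          match first.get? r with
          | some fr => decide (fr ≤ lp)
          | none => false) = true
      · rw [if_pos hany]
        refine iff_of_true rfl ⟨(p, reqs), List.mem_cons_self .., ?_⟩
        rw [hl]; exact hany
      · rw [if_neg hany, ih]
        constructor
        · rintro ⟨q, hm, hq⟩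
          exact ⟨q, List.mem_cons_of_mem _ hm, hq⟩
        · rintro ⟨q, hm, hq⟩
          rcases List.mem_cons.mp hm with rfl | hm'
          · rw [hl] at hq; exact absurd hq hany
          · exact ⟨q, hm', hq⟩

-- ===== VERDICT (by name: the statement is the Claim_ definition above) =====
theorem is_correct_sequence_spec : Claim_equal_is_correct_sequence := by
  intro seq po _ hpre
  unfold Spec_is_correct_sequence is_correct_sequence is_correct_sequence_alt
  rw [Bool.eq_iff_iff, ← Bool.not_eq_false, ← Bool.not_eq_false (pvCheck _ _ po)]
  apply not_congr
  rw [pvAGo_eq_false_iff, pvCheckRules_eq_false_iff]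
  constructor
  · rintro ⟨u, x, v, reqs, hdec, hlk, r, hr, hmem⟩
    refine ⟨(x, reqs), (pvLookup_iff_mem po hpre x reqs).mp hlk, ?_⟩
    rw [pvCondIff]
    refine ⟨v.reverse, u.reverse, ?_, r, hr, ?_⟩
    · have h2 := congrArg List.reverse hdec
      simp only [List.reverse_reverse] at h2
      rw [h2]; simp
    · simp only [List.mem_append, List.mem_reverse, List.mem_singleton]
      rcases List.mem_cons.mp hmem with rfl | h
      · exact Or.inr rfl
      · exact Or.inl h
  · rintro ⟨⟨p, reqs⟩, hm, hv⟩
    rw [pvCondIff] at hv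
    obtain ⟨u, v, hdec, r, hr, hmem⟩ := hv
    refine ⟨v.reverse, p, u.reverse, reqs, ?_, (pvLookup_iff_mem po hpre p reqs).mpr hm, r, hr, ?_⟩
    · rw [hdec]; simp
    · simp only [List.mem_append, List.mem_singleton] at hmem
      rcases hmem with h | rfl
      · exact List.mem_cons_of_mem _ (List.mem_reverse.mpr h)
      · exact List.mem_cons_self ..
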